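-- pv_equiv track=rewrite | github.com/amish-gaur/SuperScraper | data_validation.py | _bound_column_pairs
-- ===== SOURCE A (Python) =====
-- from typing import Any, Literal
--
-- LOWER_BOUND_SUFFIXES = ("_min", "_minimum", "_low")
--
-- UPPER_BOUND_SUFFIXES = ("_max", "_maximum", "_high")
--
-- def _bound_column_pairs(columns: Any) -> list[tuple[str, str]]:
--     pairs: list[tuple[str, str]] = []
--     column_names = [str(column) for column in columns]
--     for column in column_names:
--         for suffix in LOWER_BOUND_SUFFIXES:
--             if not column.endswith(suffix):
--                 continue
--             prefix = column[: -len(suffix)]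
--             for upper_suffix in UPPER_BOUND_SUFFIXES:
--                 candidate = f"{prefix}{upper_suffix}"
--                 if candidate in column_names:
--                     pairs.append((column, candidate))
--     return pairs
-- ===== SOURCE B (Python) =====
-- LOWER_BOUND_SUFFIXES = ("_min", "_minimum", "_low")
--
-- UPPER_BOUND_SUFFIXES = ("_max", "_maximum", "_high")
--
--
-- def _lower_stem(name):
--     for ls in LOWER_BOUND_SUFFIXES:
--         if name.endswith(ls):
--             return name[: -len(ls)]
--     return None
--
--
-- def _bound_column_pairs(columns):
--     column_names = [str(column) for column in columns]
--     # Pass 1: build an index prefix -> ordered list of upper suffixes present.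
--     # (Appending suffix-major keeps each list in UPPER_BOUND_SUFFIXES order;
--     # the set's iteration order is irrelevant: each stem is a distinct key.)
--     uppers_by_prefix = {}
--     for us in UPPER_BOUND_SUFFIXES:
--         for stem in {name[: -len(us)] for name in column_names if name.endswith(us)}:
--             uppers_by_prefix.setdefault(stem, []).append(us)
--     # Pass 2: one dict lookup per lower column; no candidate construction,
--     # no membership scan, no suffix loop at emission time. Correct because the
--     # lower suffixes are mutually exclusive (no string ends with two of them).
--     pairs = []
--     for column in column_names:
--         stem = _lower_stem(column)
--         if stem is not None:
--             pairs += [(column, stem + us) for us in uppers_by_prefix.get(stem, ())]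
--     return pairs
-- ===== Notes on version B (the rewrite author's own statement) =====
-- stated objective: alternative
-- what changed: B is a two-phase index join: a first pass builds a dict mapping each prefix to the ordered list of upper-bound suffixes present, and a second pass, using a helper that extracts a column's (unique) lower-suffix stem, emits that column's pairs with a single dict lookup - replacing A's triple-nested loop that constructs each candidate name and scans the whole column list for it; correctness rests on the lower suffixes being mutually exclusive.
import Mathlib
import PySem

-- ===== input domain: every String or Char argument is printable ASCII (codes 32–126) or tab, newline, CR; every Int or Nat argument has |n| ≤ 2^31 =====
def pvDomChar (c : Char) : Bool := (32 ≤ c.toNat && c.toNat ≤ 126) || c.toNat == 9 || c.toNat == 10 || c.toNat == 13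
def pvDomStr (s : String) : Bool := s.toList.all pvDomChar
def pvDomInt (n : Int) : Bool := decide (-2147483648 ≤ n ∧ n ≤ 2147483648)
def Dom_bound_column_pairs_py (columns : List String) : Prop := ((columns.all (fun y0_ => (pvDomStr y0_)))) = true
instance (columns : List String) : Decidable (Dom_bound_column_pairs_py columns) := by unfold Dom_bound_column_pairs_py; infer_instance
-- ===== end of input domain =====

-- B replaces A's triple-nested candidate-construction + list-membership scan by a two-phase join:
-- a first pass builds a prefix -> ordered-upper-suffix-list index, a second pass emits each lower
-- column's pairs by one dict lookup (alternative decomposition; no membership test at emission).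


-- ===== PORT A =====
def pyLowerBoundSuffixes : List String := ["_min", "_minimum", "_low"]
def pyUpperBoundSuffixes : List String := ["_max", "_maximum", "_high"]

-- column[: -len(suffix)] (shared by both ports: the same Python expression occurs in A and B)
def pyStrip (name suffix : String) : String :=
  PySem.Str.slice name none (some (-(PySem.Str.len suffix)))

def bound_column_pairs_py (columns : List String) : List (String × String) :=
  let column_names := columns.map (fun column => column)  -- str(column) is the identity on strings
  column_names.foldl (fun pairs column =>
    pyLowerBoundSuffixes.foldl (fun pairs suffix =>
      if PySem.Str.endswith column suffix then
        let prefx := pyStrip column suffix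
        pyUpperBoundSuffixes.foldl (fun pairs upper_suffix =>
          let candidate := prefx ++ upper_suffix
          if candidate ∈ column_names then pairs ++ [(column, candidate)] else pairs) pairs
      else pairs) pairs) []

-- ===== PORT B =====
-- _lower_stem: first (in fact only, the suffixes being mutually exclusive) matching lower suffix
def lowerStemAux : List String → String → Option String
  | [], _ => none
  | ls :: rest, name =>
    if PySem.Str.endswith name ls then some (pyStrip name ls) else lowerStemAux rest name

def bound_column_pairs_py_alt (columns : List String) : List (String × String) :=
  let column_names := columns.map (fun column => column)
  -- pass 1: prefix -> ordered list of upper suffixes present (suffix-major build; the Python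
  -- set's iteration order is irrelevant: each stem is a distinct key of the dict)
  let uppers_by_prefix : PySem.Dict String (List String) :=
    pyUpperBoundSuffixes.foldl (fun d us =>
      (PySem.Set.ofList (column_names.filterMap (fun name =>
          if PySem.Str.endswith name us then some (pyStrip name us) else none))).foldl
        (fun d stem => d.insert stem (d.getD stem [] ++ [us])) d)
      PySem.Dict.empty
  -- pass 2: one lookup per lower column
  column_names.foldl (fun pairs column =>
    match lowerStemAux pyLowerBoundSuffixes column with
    | none => pairs
    | some stem =>
        pairs ++ (uppers_by_prefix.getD stem []).map (fun us => (column, stem ++ us))) []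

-- ===== PRECONDITION & SPEC =====
def Spec_bound_column_pairs_py (columns : List String) (out : List (String × String)) : Prop := out = bound_column_pairs_py_alt columns
instance (columns : List String) (out : List (String × String)) : Decidable (Spec_bound_column_pairs_py columns out) := by unfold Spec_bound_column_pairs_py; infer_instance

-- ===== CLAIM (what is proved, stated in full; the proofs are below) =====
def Claim_equal_bound_column_pairs_py : Prop := ∀ (columns : List String), Dom_bound_column_pairs_py columns → Spec_bound_column_pairs_py columns (bound_column_pairs_py columns)

-- ===== LEMMAS AND PROOFS =====

-- name ends with us and stripping us from name leaves pre  ⟺  name is literally pre ++ us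
theorem endswith_take_iff (name pre us : List Char) (_h : 0 < us.length) :
    (PySem.Chars.endswith name us = true ∧ name.take (name.length - us.length) = pre)
      ↔ name = pre ++ us := by
  constructor
  · rintro ⟨hend, rfl⟩
    rw [PySem.Chars.endswith_iff] at hend
    obtain ⟨t, rfl⟩ := hend
    simp
  · rintro rfl
    refine ⟨PySem.Chars.endswith_iff _ _ |>.mpr ⟨pre, rfl⟩, ?_⟩
    simp

-- membership of a prefix in the per-suffix stem set ⟺ the candidate upper column is present
theorem mem_prefixSet_iff (names : List String) (us pre : String) (h : 0 < us.toList.length) :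
    (pre ∈ PySem.Set.ofList (names.filterMap (fun name =>
        if PySem.Str.endswith name us then some (pyStrip name us) else none)))
      ↔ (pre ++ us) ∈ names := by
  simp only [pyStrip]
  have hk : ((us.toList.length : Int)) = PySem.Str.len us := by
    simp [PySem.Str.len]
  rw [PySem.Set.mem_ofList, List.mem_filterMap]
  constructor
  · rintro ⟨name, hmem, hf⟩
    simp only [Option.ite_none_right_eq_some, Option.some.injEq] at hf
    obtain ⟨hend, hsl⟩ := hf
    have hend' : PySem.Chars.endswith name.toList us.toList = true := by
      simpa using hend
    have hsl' : name.toList.take (name.toList.length - us.toList.length) = pre.toList := by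
      have h2 := congrArg String.toList hsl
      rw [PySem.Str.toList_slice] at h2
      rw [PySem.Chars.slice_eq_listSlice, ← hk, PySem.List.slice_to_neg_natCast _ _ h] at h2
      exact h2
    have hlist : name.toList = pre.toList ++ us.toList :=
      (endswith_take_iff name.toList pre.toList us.toList h).mp ⟨hend', hsl'⟩
    have hname : name = pre ++ us := by
      apply String.toList_inj.mp
      simpa using hlist
    exact hname ▸ hmem
  · intro hmem
    refine ⟨pre ++ us, hmem, ?_⟩
    have h1 : (pre ++ us).toList = pre.toList ++ us.toList := by simp
    have hcond := (endswith_take_iff (pre ++ us).toList pre.toList us.toList h).mpr h1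
    simp only [Option.ite_none_right_eq_some, Option.some.injEq]
    refine ⟨by simpa using hcond.1, ?_⟩
    apply String.toList_inj.mp
    rw [PySem.Str.toList_slice]
    rw [PySem.Chars.slice_eq_listSlice, ← hk, PySem.List.slice_to_neg_natCast _ _ h]
    exact hcond.2

-- one us-block of the index build: each stem of the (duplicate-free) stem list gets us appended once
theorem getD_foldl_insert_append (S : List String) (hS : S.Nodup)
    (d : PySem.Dict String (List String)) (us p : String) :
    (S.foldl (fun d stem => d.insert stem (d.getD stem [] ++ [us])) d).getD p []
      = d.getD p [] ++ (if p ∈ S then [us] else []) := by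
  induction S generalizing d with
  | nil => simp
  | cons t T ih =>
    obtain ⟨htT, hT⟩ := List.nodup_cons.mp hS
    simp only [List.foldl_cons]
    rw [ih hT]
    rw [PySem.Dict.getD_insert]
    by_cases hpt : p = t
    · subst hpt
      simp [htT]
    · simp [hpt, List.mem_cons]

-- the whole index build: the value stored at p is exactly the present upper suffixes in canonical order
theorem getD_buildIdx (names : List String) (U : List String)
    (hU : ∀ us ∈ U, 0 < us.toList.length) (d : PySem.Dict String (List String)) (p : String) :
    (U.foldl (fun d us =>
        (PySem.Set.ofList (names.filterMap (fun name =>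
            if PySem.Str.endswith name us then some (pyStrip name us) else none))).foldl
          (fun d stem => d.insert stem (d.getD stem [] ++ [us])) d) d).getD p []
      = d.getD p [] ++ U.filter (fun us => decide ((p ++ us) ∈ names)) := by
  induction U generalizing d with
  | nil => simp
  | cons us U' ih =>
    simp only [List.foldl_cons]
    rw [ih (fun x hx => hU x (List.mem_cons_of_mem _ hx))]
    rw [getD_foldl_insert_append _ (PySem.Set.nodup_ofList _) d us p]
    rw [List.filter_cons]
    have hmem := mem_prefixSet_iff names us p (hU us (List.mem_cons_self))
    by_cases hc : (p ++ us) ∈ names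
    · rw [if_pos (hmem.mpr hc)]
      simp [hc]
    · rw [if_neg (fun hin => hc (hmem.mp hin))]
      simp [hc]

-- A's inner loop over upper suffixes = append of the mapped filtered suffix list
theorem innerA_eq_map_filter (names : List String) (pairs : List (String × String))
    (col stem : String) :
    pyUpperBoundSuffixes.foldl (fun pairs us =>
        if (stem ++ us) ∈ names then pairs ++ [(col, stem ++ us)] else pairs) pairs
      = pairs ++ (pyUpperBoundSuffixes.filter (fun us => decide ((stem ++ us) ∈ names))).map
          (fun us => (col, stem ++ us)) := by
  simp only [pyUpperBoundSuffixes, List.foldl_cons, List.foldl_nil, List.filter_cons,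
    List.filter_nil]
  split_ifs <;> simp_all

-- two distinct lower suffixes never both match one string
theorem endswith_suffix_of_both (s u v : List Char)
    (hu : PySem.Chars.endswith s u = true) (hv : PySem.Chars.endswith s v = true)
    (hlen : u.length ≤ v.length) : u <:+ v := by
  obtain ⟨t1, ht1⟩ := (PySem.Chars.endswith_iff _ _).mp hu
  obtain ⟨t2, ht2⟩ := (PySem.Chars.endswith_iff _ _).mp hv
  exact List.suffix_of_suffix_length_le ⟨t1, ht1⟩ ⟨t2, ht2⟩ hlen

-- per-column: A's nested lower/upper loops produce exactly B's lookup-driven emission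
theorem per_column (names : List String) (pairs : List (String × String)) (column : String) :
    pyLowerBoundSuffixes.foldl (fun pairs suffix =>
        if PySem.Str.endswith column suffix then
          pyUpperBoundSuffixes.foldl (fun pairs upper_suffix =>
            if (pyStrip column suffix ++ upper_suffix) ∈ names then
              pairs ++ [(column, pyStrip column suffix ++ upper_suffix)] else pairs) pairs
        else pairs) pairs
      = match lowerStemAux pyLowerBoundSuffixes column with
        | none => pairs
        | some stem =>
            pairs ++ (pyUpperBoundSuffixes.filter (fun us => decide ((stem ++ us) ∈ names))).map
              (fun us => (column, stem ++ us)) := by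
  have hex : ∀ u v : List Char, u.length ≤ v.length → ¬ (u <:+ v) →
      PySem.Chars.endswith column.toList u = true → PySem.Chars.endswith column.toList v = false := by
    intro u v hlen hns hcu
    cases hb : PySem.Chars.endswith column.toList v with
    | false => rfl
    | true => exact absurd (endswith_suffix_of_both column.toList u v hcu hb hlen) hns
  simp only [pyLowerBoundSuffixes, List.foldl_cons, List.foldl_nil, lowerStemAux,
    PySem.Str.endswith]
  by_cases h1 : PySem.Chars.endswith column.toList "_min".toList = true
  · have h2 : PySem.Chars.endswith column.toList "_minimum".toList = false :=
      hex _ _ (by decide) (by decide) h1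
    have h3 : PySem.Chars.endswith column.toList "_low".toList = false :=
      hex _ _ (by decide) (by decide) h1
    simp only [h1, h2, h3, if_true, if_false, Bool.false_eq_true]
    exact innerA_eq_map_filter names pairs column (pyStrip column "_min")
  · have h1' : PySem.Chars.endswith column.toList "_min".toList = false := by simpa using h1
    by_cases h2 : PySem.Chars.endswith column.toList "_minimum".toList = true
    · have h3 : PySem.Chars.endswith column.toList "_low".toList = false := by
        cases hb : PySem.Chars.endswith column.toList "_low".toList with
        | false => rfl
        | true =>
            exact absurd (endswith_suffix_of_both column.toList "_low".toList
              "_minimum".toList hb h2 (by decide)) (by decide)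
      simp only [h1', h2, h3, if_true, if_false, Bool.false_eq_true]
      exact innerA_eq_map_filter names pairs column (pyStrip column "_minimum")
    · have h2' : PySem.Chars.endswith column.toList "_minimum".toList = false := by simpa using h2
      by_cases h3 : PySem.Chars.endswith column.toList "_low".toList = true
      · simp only [h1', h2', h3, if_true, if_false, Bool.false_eq_true]
        exact innerA_eq_map_filter names pairs column (pyStrip column "_low")
      · have h3' : PySem.Chars.endswith column.toList "_low".toList = false := by simpa using h3
        simp only [h1', h2', h3', Bool.false_eq_true, if_false]

-- ===== VERDICT (by name: the statement is the Claim_ definition above) =====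
theorem bound_column_pairs_py_spec : Claim_equal_bound_column_pairs_py := by
  intro columns _
  unfold Spec_bound_column_pairs_py bound_column_pairs_py bound_column_pairs_py_alt
  simp only [List.map_id']
  apply List.foldl_ext
  intro pairs column _
  rw [per_column columns pairs column]
  have hidx := getD_buildIdx columns pyUpperBoundSuffixes
    (by intro us hus; fin_cases hus <;> decide) PySem.Dict.empty
  simp only [PySem.Dict.getD_empty, List.nil_append] at hidx
  cases lowerStemAux pyLowerBoundSuffixes column with
  | none => rfl
  | some stem => simp only [hidx]
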